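-- pv_equiv track=rewrite | github.com/ram-020998/nexus-gen-v2 | services/sail_formatter.py | _clean_formatting
-- ===== SOURCE A (Python) =====
-- def _clean_formatting(code: str) -> str:
--     """Clean up code formatting"""
--     # Remove excessive whitespace while preserving structure
--     lines = code.split('\n')
--     cleaned_lines = []
--
--     for line in lines:
--         # Remove trailing whitespace but preserve indentation
--         cleaned_line = line.rstrip()
--         if cleaned_line or (cleaned_lines and cleaned_lines[-1].strip()):
--             cleaned_lines.append(cleaned_line)
--
--     # Remove excessive empty lines (more than 2 consecutive)
--     result_lines = []
--     empty_count = 0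
--
--     for line in cleaned_lines:
--         if line.strip():
--             result_lines.append(line)
--             empty_count = 0
--         else:
--             empty_count += 1
--             if empty_count <= 2:
--                 result_lines.append(line)
--
--     return '\n'.join(result_lines)
-- ===== SOURCE B (Python) =====
-- def _clean_formatting(code: str) -> str:
--     """Clean up code formatting"""
--     stripped = [line.rstrip() for line in code.split('\n')]
--     # a line is kept iff it is nonblank, or its immediate predecessor is nonblank
--     return '\n'.join(line for prev, line in zip([''] + stripped, stripped)
--                      if line or prev)
-- ===== Notes on version B (the rewrite author's own statement) =====
-- stated objective: simpler
-- what changed: Replaces A's two stateful accumulator passes (inspecting the last kept line, then an empty-line counter) by one stateless pairwise filter over the rstripped lines zipped with their predecessors: a line is kept iff it is nonblank or its immediate predecessor is nonblank, which makes A's whole second pass redundant.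
import Mathlib
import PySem

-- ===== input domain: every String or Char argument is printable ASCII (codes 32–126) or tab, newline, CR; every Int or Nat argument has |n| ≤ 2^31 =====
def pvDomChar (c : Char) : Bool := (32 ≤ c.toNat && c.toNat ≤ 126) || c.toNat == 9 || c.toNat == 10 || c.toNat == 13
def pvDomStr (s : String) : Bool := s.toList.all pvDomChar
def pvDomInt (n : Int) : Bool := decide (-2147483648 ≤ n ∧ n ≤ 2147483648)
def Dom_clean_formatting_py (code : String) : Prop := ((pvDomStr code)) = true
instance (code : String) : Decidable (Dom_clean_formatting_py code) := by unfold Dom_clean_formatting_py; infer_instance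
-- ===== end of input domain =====

-- B replaces A's two stateful passes by one stateless pairwise filter (a line is kept
-- iff it is nonblank or its predecessor is nonblank); objective: simpler.

-- ===== PORT A =====
-- first loop body: append the rstripped line if it is nonblank, or the last kept line is nonblank
def pvStep1 (acc : List (List Char)) (line : List Char) : List (List Char) :=
  let cleaned_line := PySem.Chars.rstrip line
  let keep : Bool := !cleaned_line.isEmpty ||
    (!acc.isEmpty &&
      (match PySem.List.pyGet? acc (-1) with
       | some last => !(PySem.Chars.strip last).isEmpty
       | none => false))
  if keep then acc ++ [cleaned_line] else acc

-- second loop body: keep nonblank lines; keep a blank only while empty_count ≤ 2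
def pvStep2 (st : List (List Char) × Nat) (line : List Char) : List (List Char) × Nat :=
  if !(PySem.Chars.strip line).isEmpty then (st.1 ++ [line], 0)
  else
    let empty_count := st.2 + 1
    if empty_count ≤ 2 then (st.1 ++ [line], empty_count) else (st.1, empty_count)

def clean_formatting_py (code : String) : String :=
  let lines := PySem.Chars.splitOn code.toList ['\n']
  let cleaned_lines := lines.foldl pvStep1 []
  let res := cleaned_lines.foldl pvStep2 ([], 0)
  String.ofList (PySem.Chars.join ['\n'] res.1)

-- ===== PORT B =====
def clean_formatting_py_alt (code : String) : String :=
  let stripped := (PySem.Chars.splitOn code.toList ['\n']).map PySem.Chars.rstrip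
  let kept := ((([] :: stripped).zip stripped).filter
      (fun p => !p.2.isEmpty || !p.1.isEmpty)).map (·.2)
  String.ofList (PySem.Chars.join ['\n'] kept)

-- ===== PRECONDITION & SPEC =====
def Spec_clean_formatting_py (code : String) (out : String) : Prop := out = clean_formatting_py_alt code
instance (code : String) (out : String) : Decidable (Spec_clean_formatting_py code out) := by unfold Spec_clean_formatting_py; infer_instance

-- ===== CLAIM (what is proved, stated in full; the proofs are below) =====
def Claim_equal_clean_formatting_py : Prop := ∀ (code : String), Dom_clean_formatting_py code → Spec_clean_formatting_py code (clean_formatting_py code)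

-- ===== LEMMAS AND PROOFS =====

-- the pairwise filter B computes, as a recursion carrying the predecessor line
def pvFilt : List Char → List (List Char) → List (List Char)
  | _, [] => []
  | prev, x :: xs => if (!x.isEmpty || !prev.isEmpty) then x :: pvFilt x xs else pvFilt x xs

-- "no blank line is followed by a blank line"
def pvNoBB : List (List Char) → Prop
  | [] => True
  | [_] => True
  | a :: b :: t => (a = [] → b ≠ []) ∧ pvNoBB (b :: t)

theorem pv_dropWhile_idem (p : Char → Bool) (l : List Char) :
    List.dropWhile p (List.dropWhile p l) = List.dropWhile p l := by
  induction l with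
  | nil => simp
  | cons a t ih =>
    by_cases h : p a = true <;> simp [h, ih]

theorem pv_rstrip_idem (l : List Char) :
    PySem.Chars.rstrip (PySem.Chars.rstrip l) = PySem.Chars.rstrip l := by
  simp [PySem.Chars.rstrip, pv_dropWhile_idem]

theorem pv_strip_nil_iff (t : List Char) :
    PySem.Chars.strip t = [] ↔ PySem.Chars.rstrip t = [] := by
  simp only [PySem.Chars.strip, PySem.Chars.rstrip, PySem.Chars.lstrip,
    List.reverse_eq_nil_iff, List.dropWhile_eq_nil_iff, List.mem_reverse]
  constructor
  · intro h x hx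
    have hx' : x ∈ List.takeWhile PySem.Chars.isspace t ++ List.dropWhile PySem.Chars.isspace t := by
      rw [List.takeWhile_append_dropWhile]; exact hx
    rcases List.mem_append.mp hx' with h1 | h1
    · exact List.mem_takeWhile_imp h1
    · exact h x h1
  · intro h x hx
    exact h x ((List.dropWhile_sublist _).mem hx)

-- for an already-rstripped line, .strip() is blank iff the line is blank
theorem pv_strip_isEmpty (e : List Char) (he : PySem.Chars.rstrip e = e) :
    (PySem.Chars.strip e).isEmpty = e.isEmpty := by
  have h1 : PySem.Chars.strip e = [] ↔ e = [] := by rw [pv_strip_nil_iff, he]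
  rcases eq_or_ne e [] with h | h
  · rw [List.isEmpty_iff.mpr (h1.mpr h), List.isEmpty_iff.mpr h]
  · rw [List.isEmpty_eq_false_iff.mpr (fun hc => h (h1.mp hc)),
      List.isEmpty_eq_false_iff.mpr h]

theorem pv_pyGet_neg_one (acc : List (List Char)) (h : acc ≠ []) :
    PySem.List.pyGet? acc (-1) = acc.getLast? := by
  have hl : 1 ≤ acc.length := List.length_pos_iff.mpr h
  have h1 : PySem.List.pyIdx? acc.length (-1) = some (acc.length - 1) := by
    unfold PySem.List.pyIdx?
    rw [if_neg (by decide), if_pos (by omega)]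
    norm_num
  simp [PySem.List.pyGet?, h1, List.getLast?_eq_getElem?]

-- pass 1 of A computes the pairwise filter
theorem pv_pass1 (lines : List (List Char)) : ∀ (acc : List (List Char)),
    (∀ e ∈ acc, PySem.Chars.rstrip e = e) →
    lines.foldl pvStep1 acc = acc ++ pvFilt (acc.getLast?.getD []) (lines.map PySem.Chars.rstrip) := by
  induction lines with
  | nil => intro acc _; simp [pvFilt]
  | cons l lt ih =>
    intro acc hacc
    rw [List.foldl_cons]
    have hkeep : pvStep1 acc l =
        if (!(PySem.Chars.rstrip l).isEmpty || !(acc.getLast?.getD []).isEmpty) = true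
        then acc ++ [PySem.Chars.rstrip l] else acc := by
      unfold pvStep1
      cases hA : acc.getLast? with
      | none =>
        have hacc0 : acc = [] := List.getLast?_eq_none_iff.mp hA
        subst hacc0
        simp [PySem.List.pyGet?, PySem.List.pyIdx?]
      | some last =>
        have hne : acc ≠ [] := by
          intro hc; subst hc; simp at hA
        have hlast : PySem.Chars.rstrip last = last := hacc last (List.mem_of_getLast? hA)
        rw [pv_pyGet_neg_one acc hne, hA]
        simp only [List.isEmpty_eq_false_iff.mpr hne, Bool.not_false, Bool.true_and,
          pv_strip_isEmpty last hlast, Option.getD_some]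
        rfl
    rw [hkeep, List.map_cons]
    by_cases hk : (!(PySem.Chars.rstrip l).isEmpty || !(acc.getLast?.getD []).isEmpty) = true
    · rw [if_pos hk]
      have hacc' : ∀ e ∈ acc ++ [PySem.Chars.rstrip l], PySem.Chars.rstrip e = e := by
        intro e he
        rcases List.mem_append.mp he with h1 | h1
        · exact hacc e h1
        · rw [List.mem_singleton.mp h1]; exact pv_rstrip_idem l
      rw [ih (acc ++ [PySem.Chars.rstrip l]) hacc', List.getLast?_concat, Option.getD_some]
      rw [pvFilt, if_pos hk]
      simp [List.append_assoc]
    · rw [if_neg hk]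
      simp only [Bool.or_eq_true, not_or, Bool.not_eq_eq_eq_not,
        Bool.not_true] at hk
      have hl0 : PySem.Chars.rstrip l = [] := List.isEmpty_iff.mp (by simpa using hk.1)
      have hp0 : acc.getLast?.getD [] = [] := List.isEmpty_iff.mp (by simpa using hk.2)
      rw [ih acc hacc, pvFilt, if_neg (by simp [hl0, hp0]), hl0, hp0]

theorem pv_head_filt_nil : ∀ (xs : List (List Char)) (h : List Char),
    (pvFilt [] xs).head? = some h → h ≠ [] := by
  intro xs
  induction xs with
  | nil => intro h hc; simp [pvFilt] at hc
  | cons x xt ih =>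
    intro h hc
    by_cases hx : x = []
    · subst hx
      simp only [pvFilt, List.isEmpty_nil, Bool.not_true, Bool.or_self] at hc
      exact ih h (by simpa using hc)
    · simp only [pvFilt, List.isEmpty_eq_false_iff.mpr hx, Bool.not_false, Bool.true_or,
        if_pos, List.head?_cons, Option.some_inj] at hc
      exact hc ▸ hx

theorem pv_filt_noBB : ∀ (xs : List (List Char)) (prev : List Char), pvNoBB (pvFilt prev xs) := by
  intro xs
  induction xs with
  | nil => intro prev; rw [pvFilt]; trivial
  | cons x xt ih =>
    intro prev
    by_cases h : (!x.isEmpty || !prev.isEmpty) = true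
    · rw [pvFilt, if_pos h]
      cases hft : pvFilt x xt with
      | nil => trivial
      | cons y yt =>
        refine ⟨?_, hft ▸ ih x⟩
        intro hx hyc
        subst hx
        exact pv_head_filt_nil xt y (by rw [hft]; rfl) hyc
    · rw [pvFilt, if_neg h]; exact ih x

theorem pv_filt_mem : ∀ (xs : List (List Char)) (prev : List Char) (e : List Char),
    e ∈ pvFilt prev xs → e ∈ xs := by
  intro xs
  induction xs with
  | nil => intro prev e h; simp [pvFilt] at h
  | cons x xt ih =>
    intro prev e h
    unfold pvFilt at h
    split at h
    · rcases List.mem_cons.mp h with h1 | h1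
      · exact h1 ▸ List.mem_cons_self
      · exact List.mem_cons_of_mem _ (ih x e h1)
    · exact List.mem_cons_of_mem _ (ih x e h)

-- pass 2 of A is the identity on a list of rstripped lines with no two adjacent blanks
theorem pv_pass2 : ∀ (r : List (List Char)) (res : List (List Char)) (cnt : Nat),
    pvNoBB r → (∀ e ∈ r, PySem.Chars.rstrip e = e) →
    (r.head? = some [] → cnt ≤ 1) →
    (r.foldl pvStep2 (res, cnt)).1 = res ++ r := by
  intro r
  induction r with
  | nil => intro res cnt _ _ _; simp
  | cons x xt ih =>
    intro res cnt hbb hstr hcnt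
    have hx : PySem.Chars.rstrip x = x := hstr x List.mem_cons_self
    have hstr' : ∀ e ∈ xt, PySem.Chars.rstrip e = e := fun e he => hstr e (List.mem_cons_of_mem _ he)
    by_cases hxe : x = []
    · subst hxe
      have hc : cnt ≤ 1 := hcnt (by simp)
      have h2 : cnt + 1 ≤ 2 := Nat.succ_le_succ hc
      have hstep : pvStep2 (res, cnt) [] = (res ++ [[]], cnt + 1) := by
        unfold pvStep2
        simp [PySem.Chars.strip, PySem.Chars.rstrip, PySem.Chars.lstrip, h2]
      rw [List.foldl_cons, hstep, ih (res ++ [[]]) (cnt + 1) ?_ hstr' ?_]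
      · simp
      · cases xt with
        | nil => trivial
        | cons y yt => exact hbb.2
      · intro hh
        cases xt with
        | nil => simp at hh
        | cons y yt =>
          exact ((hbb.1 rfl) (by simpa using hh)).elim
    · have hstep : pvStep2 (res, cnt) x = (res ++ [x], 0) := by
        unfold pvStep2
        rw [pv_strip_isEmpty x hx, List.isEmpty_eq_false_iff.mpr hxe]
        simp
      rw [List.foldl_cons, hstep, ih (res ++ [x]) 0 ?_ hstr' (fun _ => Nat.zero_le 1)]
      · simp
      · cases xt with
        | nil => trivial
        | cons y yt => exact hbb.2

-- B's zip/filter/map is the pairwise filter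
theorem pv_zipfilt : ∀ (ss : List (List Char)) (prev : List Char),
    (((prev :: ss).zip ss).filter (fun p => !p.2.isEmpty || !p.1.isEmpty)).map (·.2)
      = pvFilt prev ss := by
  intro ss
  induction ss with
  | nil => intro prev; simp [pvFilt]
  | cons x xs ih =>
    intro prev
    rw [List.zip_cons_cons, List.filter_cons]
    by_cases h : (!x.isEmpty || !prev.isEmpty) = true
    · rw [if_pos h, List.map_cons, ih x, pvFilt, if_pos h]
    · rw [if_neg h, ih x]
      have : pvFilt prev (x :: xs) = pvFilt x xs := by
        rw [pvFilt, if_neg h]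
      rw [this]

-- ===== VERDICT (by name: the statement is the Claim_ definition above) =====
theorem clean_formatting_py_spec : Claim_equal_clean_formatting_py := by
  intro code _
  unfold Spec_clean_formatting_py clean_formatting_py clean_formatting_py_alt
  show String.ofList (PySem.Chars.join ['\n']
      ((List.foldl pvStep2 ([], 0) (List.foldl pvStep1 [] (PySem.Chars.splitOn code.toList ['\n']))).1))
    = String.ofList (PySem.Chars.join ['\n']
      (((((([] : List Char) :: (PySem.Chars.splitOn code.toList ['\n']).map PySem.Chars.rstrip)).zip
          ((PySem.Chars.splitOn code.toList ['\n']).map PySem.Chars.rstrip)).filter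
          (fun p => !p.2.isEmpty || !p.1.isEmpty)).map (·.2)))
  have hpass1 := pv_pass1 (PySem.Chars.splitOn code.toList ['\n']) [] (by simp)
  simp only [List.nil_append, List.getLast?_nil, Option.getD_none] at hpass1
  rw [hpass1, pv_zipfilt]
  set ss := (PySem.Chars.splitOn code.toList ['\n']).map PySem.Chars.rstrip with hss
  have hstr : ∀ e ∈ pvFilt [] ss, PySem.Chars.rstrip e = e := by
    intro e he
    rcases List.mem_map.mp (pv_filt_mem ss [] e he) with ⟨l, _, hl⟩
    exact hl ▸ pv_rstrip_idem l
  have hpass2 := pv_pass2 (pvFilt [] ss) [] 0 (pv_filt_noBB ss []) hstr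
    (fun hh => absurd rfl (pv_head_filt_nil ss [] hh))
  rw [hpass2, List.nil_append]
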